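-- pv_equiv track=rewrite | github.com/amnonskalka/ip_detection | func.py | ip_finder
-- ===== SOURCE A (Python) =====
-- def store_details(opt, part_cnt, tmp_list):
--     key = "part" + str(part_cnt)
--     opt_dic = map(str, tmp_list)
--     opt_dic = ''.join(opt_dic)
--     opt.setdefault(key, [])
--     opt[key].append(opt_dic)
--
-- def ip_finder(a):
--     tmp_list = []
--     opt = {}
--     part_cnt = 0
--
--     for x in a:
--         if x.isdigit():
--             if len(tmp_list) < 3:
--                 tmp_list.append(x)
--             else:
--                 store_details(opt, part_cnt, tmp_list)
--                 tmp_list = []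
--                 tmp_list.append(x)
--
--         elif x == '.':
--             store_details(opt, part_cnt, tmp_list)
--             tmp_list = []
--             part_cnt += 1
--
--     store_details(opt, part_cnt, tmp_list)
--
--     return opt
-- ===== SOURCE B (Python) =====
-- def ip_finder(a):
--     opt = {}
--     for i, part in enumerate(a.split('.')):
--         digits = ''.join(c for c in part if c.isdigit())
--         opt['part' + str(i)] = [digits[j:j + 3] for j in range(0, len(digits), 3)] or ['']
--     return opt
-- ===== Notes on version B (the rewrite author's own statement) =====
-- stated objective: simpler
-- what changed: Replaces the streaming buffer/flush state machine over single characters (with a dict mutated via setdefault/append) with a split-first pass: split the string on the dot separator, filter each part's digits, slice them into 3-char chunks with a range comprehension, and assign each key once.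
import Mathlib
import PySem

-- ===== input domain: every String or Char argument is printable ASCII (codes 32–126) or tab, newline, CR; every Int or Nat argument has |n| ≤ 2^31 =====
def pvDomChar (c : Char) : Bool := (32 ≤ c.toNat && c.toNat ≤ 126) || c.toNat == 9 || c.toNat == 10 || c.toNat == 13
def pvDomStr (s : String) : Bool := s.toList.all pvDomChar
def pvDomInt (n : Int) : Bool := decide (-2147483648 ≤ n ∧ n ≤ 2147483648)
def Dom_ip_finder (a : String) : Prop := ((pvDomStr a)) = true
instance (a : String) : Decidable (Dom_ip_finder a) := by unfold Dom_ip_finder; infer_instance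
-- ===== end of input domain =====

-- B replaces A's streaming buffer/flush state machine with split-on-'.' then per-part digit filtering
-- and 3-character chunking (objective: simpler; same asymptotic cost).

-- ===== PORT A =====
-- store_details(opt, part_cnt, tmp_list): tmp_list holds single-character strings, modelled as chars;
-- ''.join(map(str, tmp_list)) is the join of those one-char strings (exact: str of a str is itself);
-- opt.setdefault(key, []) followed by opt[key].append(v) is Dict.setdefault then Dict.modify.

def storeDetails (opt : PySem.Dict String (List String)) (part_cnt : Int) (tmp_list : List Char) :
    PySem.Dict String (List String) :=
  let key := "part" ++ PySem.Int.toStr part_cnt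
  let opt_dic := String.ofList (PySem.Chars.join [] (tmp_list.map (fun c => [c])))
  let opt1 := opt.setdefault key []
  opt1.modify key [] (fun l => l ++ [opt_dic])

def ipStep (st : List Char × PySem.Dict String (List String) × Int) (x : Char) :
    List Char × PySem.Dict String (List String) × Int :=
  let (tmp_list, opt, part_cnt) := st
  if PySem.Chars.isdigit x then
    if tmp_list.length < 3 then (tmp_list ++ [x], opt, part_cnt)
    else ([x], storeDetails opt part_cnt tmp_list, part_cnt)
  else if x = '.' then ([], storeDetails opt part_cnt tmp_list, part_cnt + 1)
  else st

def ip_finder (a : String) : List (String × List String) :=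
  let st := a.toList.foldl ipStep ([], PySem.Dict.empty, 0)
  (storeDetails st.2.1 st.2.2 st.1).items

-- ===== PORT B =====
-- Source B: split on '.', keep each part's digits (''.join over a filtering generator, modelled on
-- List Char), chunk them by 3 with a range(0, len, 3) comprehension of slices, `or ['']` if empty.
def ip_finder_alt (a : String) : List (String × List String) :=
  let parts := PySem.Chars.splitOn a.toList ".".toList
  let opt := (PySem.List.enumerate parts).foldl
    (fun (opt : PySem.Dict String (List String)) ip =>
      let digits := PySem.Chars.join [] ((ip.2.filter (fun c => PySem.Chars.isdigit c)).map (fun c => [c]))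
      let chunks := (PySem.List.pyRange 0 (PySem.Chars.len digits) 3).map
        (fun j => String.ofList (PySem.List.slice digits (some j) (some (j + 3))))
      opt.insert ("part" ++ PySem.Int.toStr ip.1) (if chunks = [] then [""] else chunks))
    PySem.Dict.empty
  opt.items

-- ===== PRECONDITION & SPEC =====
def Spec_ip_finder (a : String) (out : List (String × List String)) : Prop := out = ip_finder_alt a
instance (a : String) (out : List (String × List String)) : Decidable (Spec_ip_finder a out) := by unfold Spec_ip_finder; infer_instance

-- ===== CLAIM (what is proved, stated in full; the proofs are below) =====
def Claim_equal_ip_finder : Prop := ∀ (a : String), Dom_ip_finder a → Spec_ip_finder a (ip_finder a)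

-- ===== LEMMAS AND PROOFS =====

/- ----- "part" ++ str(n) keys are pairwise distinct ----- -/

theorem pvDigitChar_inj {a b : Nat} (ha : a < 10) (hb : b < 10) (h : Nat.digitChar a = Nat.digitChar b) : a = b := by
  interval_cases a <;> interval_cases b <;> simp_all [Nat.digitChar]

theorem pvToDigits_ne_nil (n : Nat) : Nat.toDigits 10 n ≠ [] := by
  rw [Nat.toDigits_eq_if (by norm_num)]
  split <;> simp

theorem pvToDigits_inj : ∀ n m : Nat, Nat.toDigits 10 n = Nat.toDigits 10 m → n = m := by
  intro n
  induction n using Nat.strong_induction_on with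
  | _ n ih =>
    intro m h
    by_cases h1 : n < 10 <;> by_cases h2 : m < 10
    · rw [Nat.toDigits_of_lt_base h1, Nat.toDigits_of_lt_base h2] at h
      exact pvDigitChar_inj h1 h2 (by simpa using h)
    · have hm := Nat.toDigits_eq_if (b := 10) (n := m) (by norm_num)
      rw [if_neg h2] at hm
      rw [Nat.toDigits_of_lt_base h1, hm,
        show Nat.toDigits 10 (m / 10) ++ [Nat.digitChar (m % 10)] = (Nat.toDigits 10 (m / 10)).concat (Nat.digitChar (m % 10)) by simp,
        show [Nat.digitChar n] = List.concat [] (Nat.digitChar n) by simp] at h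
      exact absurd (List.concat_inj.mp h).1.symm (pvToDigits_ne_nil _)
    · have hn := Nat.toDigits_eq_if (b := 10) (n := n) (by norm_num)
      rw [if_neg h1] at hn
      rw [Nat.toDigits_of_lt_base h2, hn,
        show Nat.toDigits 10 (n / 10) ++ [Nat.digitChar (n % 10)] = (Nat.toDigits 10 (n / 10)).concat (Nat.digitChar (n % 10)) by simp,
        show [Nat.digitChar m] = List.concat [] (Nat.digitChar m) by simp] at h
      exact absurd (List.concat_inj.mp h).1 (pvToDigits_ne_nil _)
    · have hn := Nat.toDigits_eq_if (b := 10) (n := n) (by norm_num)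
      have hm := Nat.toDigits_eq_if (b := 10) (n := m) (by norm_num)
      rw [if_neg h1] at hn
      rw [if_neg h2] at hm
      rw [hn, hm,
        show Nat.toDigits 10 (n / 10) ++ [Nat.digitChar (n % 10)] = (Nat.toDigits 10 (n / 10)).concat (Nat.digitChar (n % 10)) by simp,
        show Nat.toDigits 10 (m / 10) ++ [Nat.digitChar (m % 10)] = (Nat.toDigits 10 (m / 10)).concat (Nat.digitChar (m % 10)) by simp] at h
      obtain ⟨h3, h4⟩ := List.concat_inj.mp h
      have hdiv := ih (n / 10) (Nat.div_lt_self (by omega) (by norm_num)) (m / 10) h3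
      have hmod := pvDigitChar_inj (Nat.mod_lt _ (by norm_num)) (Nat.mod_lt _ (by norm_num)) h4
      omega

def pvKey (n : Nat) : String := "part" ++ PySem.Int.toStr (n : Int)

theorem pvKeyInt_inj {i j : Int} (hi : 0 ≤ i) (hj : 0 ≤ j)
    (h : "part" ++ PySem.Int.toStr i = "part" ++ PySem.Int.toStr j) : i = j := by
  have h2 : ("part" ++ PySem.Int.toStr i).toList = ("part" ++ PySem.Int.toStr j).toList := by rw [h]
  rw [String.toList_append, String.toList_append, PySem.Int.toList_toStr, PySem.Int.toList_toStr] at h2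
  have h3 : PySem.Int.toChars i = PySem.Int.toChars j := List.append_cancel_left h2
  unfold PySem.Int.toChars at h3
  rw [if_neg (by omega), if_neg (by omega)] at h3
  have := pvToDigits_inj i.toNat j.toNat h3
  omega

theorem pvKey_inj {m n : Nat} (h : pvKey m = pvKey n) : m = n := by
  have := pvKeyInt_inj (i := (m : Int)) (j := (n : Int)) (by omega) (by omega) h
  omega

/- ----- splitting on '.' ----- -/

def pvSplit : List Char → List (List Char)
  | [] => [[]]
  | c :: cs =>
    if c = '.' then [] :: pvSplit cs
    else
      match pvSplit cs with
      | [] => [[c]]      -- unreachable: pvSplit never returns []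
      | h :: t => (c :: h) :: t

theorem pvSplit_ne_nil (cs : List Char) : pvSplit cs ≠ [] := by
  cases cs with
  | nil => simp [pvSplit]
  | cons c cs =>
    simp only [pvSplit]
    split
    · simp
    · split <;> simp

def pvModHead (pre : List Char) : List (List Char) → List (List Char)
  | [] => [pre]
  | h :: t => (pre ++ h) :: t

theorem pvSplitOn_go_eq : ∀ (fuel : Nat) (l cur : List Char) (acc : List (List Char)),
    l.length < fuel →
    PySem.Chars.splitOn.go ['.'] fuel l cur acc
      = acc.reverse ++ pvModHead cur.reverse (pvSplit l) := by
  intro fuel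
  induction fuel with
  | zero => intro l cur acc h; omega
  | succ fuel ih =>
    intro l cur acc h
    cases l with
    | nil =>
      simp [PySem.Chars.splitOn.go, pvSplit, pvModHead]
    | cons c rest =>
      simp only [PySem.Chars.splitOn.go]
      by_cases hc : c = '.'
      · subst hc
        rw [if_pos (by simp [List.isPrefixOf])]
        rw [ih _ _ _ (by simpa using Nat.lt_of_succ_lt_succ h)]
        simp only [pvSplit, if_pos rfl, List.reverse_cons, List.reverse_nil, List.nil_append,
          List.length_cons, List.drop_succ_cons, List.drop_zero, pvModHead]
        rw [List.append_assoc]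
        congr 1
        cases hs : pvSplit rest with
        | nil => exact absurd hs (pvSplit_ne_nil rest)
        | cons h t => simp [hs, pvModHead]
      · rw [if_neg (by simp [List.isPrefixOf]; exact fun he => hc he.symm)]
        rw [ih _ _ _ (by simpa using Nat.lt_of_succ_lt_succ h)]
        simp only [pvSplit, if_neg hc]
        congr 1
        cases hs : pvSplit rest with
        | nil => exact absurd hs (pvSplit_ne_nil rest)
        | cons h t => simp [hs, pvModHead]

theorem pvSplitOn_eq (s : List Char) : PySem.Chars.splitOn s ['.'] = pvSplit s := by
  unfold PySem.Chars.splitOn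
  rw [pvSplitOn_go_eq (s.length + 1) s [] [] (by omega)]
  cases hs : pvSplit s with
  | nil => exact absurd hs (pvSplit_ne_nil s)
  | cons h t => simp [pvModHead]

/- ----- chunking digits by 3 ----- -/

theorem pyRange3_shift (m : Nat) :
    PySem.List.pyRange 0 ((3 + m : Nat) : Int) 3 = 0 :: (PySem.List.pyRange 0 ((m : Nat) : Int) 3).map (· + 3) := by
  rw [PySem.List.pyRange_of_pos _ _ (by norm_num), PySem.List.pyRange_of_pos _ _ (by norm_num)]
  rcases Nat.eq_zero_or_pos m with hm | hm
  · subst hm; decide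
  · rw [if_pos (by push_cast; omega), if_pos (by push_cast; omega)]
    have h1 : ((((3 + m : Nat) : Int) - 0 + 3 - 1) / 3).toNat = ((((m : Nat) : Int) - 0 + 3 - 1) / 3).toNat + 1 := by
      push_cast
      rw [show ((3:Int) + m - 0 + 3 - 1) = (m + 2) + 1 * 3 by ring, Int.add_mul_ediv_right _ _ (by norm_num)]
      rw [show ((m:Int) - 0 + 3 - 1) = m + 2 by ring]
      have : (0:Int) ≤ (m + 2) / 3 := Int.ediv_nonneg (by omega) (by omega)
      omega
    rw [h1, List.range_succ_eq_map]
    simp only [List.map_map, List.map_cons, Function.comp]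
    norm_num
    intro a _
    ring

def pvChunk3 : List Char → List String
  | [] => []
  | [a] => [String.ofList [a]]
  | [a, b] => [String.ofList [a, b]]
  | a :: b :: c :: rest => String.ofList [a, b, c] :: pvChunk3 rest

theorem pvChunksB_eq : ∀ (l : List Char),
    (PySem.List.pyRange 0 (PySem.Chars.len l) 3).map
      (fun j => String.ofList (PySem.List.slice l (some j) (some (j + 3)))) = pvChunk3 l := by
  intro l
  induction l using pvChunk3.induct with
  | case1 => simp [pvChunk3, PySem.List.pyRange]
  | case2 a =>
    have h0 : PySem.List.pyRange 0 (PySem.Chars.len [a]) 3 = [0] := by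
      simp [PySem.Chars.len]; decide
    rw [h0]
    simp only [List.map_cons, List.map_nil, pvChunk3]
    rw [PySem.List.slice_toNat _ (le_refl 0) (by norm_num)]
    simp
  | case3 a b =>
    have h0 : PySem.List.pyRange 0 (PySem.Chars.len [a, b]) 3 = [0] := by
      simp [PySem.Chars.len]; decide
    rw [h0]
    simp only [List.map_cons, List.map_nil, pvChunk3]
    rw [PySem.List.slice_toNat _ (le_refl 0) (by norm_num)]
    simp
  | case4 a b c rest ih =>
    have hlen : PySem.Chars.len (a :: b :: c :: rest) = ((3 + rest.length : Nat) : Int) := by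
      simp [PySem.Chars.len]; push_cast; omega
    rw [hlen, pyRange3_shift]
    simp only [List.map_cons, List.map_map, pvChunk3]
    have hhead : String.ofList (PySem.List.slice (a :: b :: c :: rest) (some 0) (some (0 + 3)))
        = String.ofList [a, b, c] := by
      rw [PySem.List.slice_toNat _ (le_refl 0) (by norm_num)]
      simp
    rw [hhead]
    congr 1
    rw [← ih]
    simp only [PySem.Chars.len_eq]
    apply List.map_congr_left
    intro j hj
    have hj0 : 0 ≤ j := by
      rcases (PySem.List.mem_pyRange_iff_of_pos (by norm_num) j).mp hj with ⟨h0, _⟩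
      exact h0
    simp only [Function.comp_apply]
    rw [PySem.List.slice_toNat _ (by omega) (by omega),
        PySem.List.slice_toNat _ (by omega) (by omega)]
    have h3 : (j + 3).toNat = j.toNat + 3 := by omega
    have h6 : (j + 3 + 3).toNat = j.toNat + 6 := by omega
    rw [h3, h6]
    have hdrop : List.drop (j.toNat + 3) (a :: b :: c :: rest) = List.drop j.toNat rest := by
      rw [show j.toNat + 3 = j.toNat + 1 + 1 + 1 by omega]
      simp [List.drop_succ_cons]
    have hc : j.toNat + 6 - (j.toNat + 3) = 3 := by omega
    have hc2 : j.toNat + 3 - j.toNat = 3 := by omega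
    rw [hdrop, hc, hc2]

def pvChunk3' (l : List Char) : List String := if l = [] then [""] else pvChunk3 l

def pvDigits (s : List Char) : List Char := s.filter (fun c => PySem.Chars.isdigit c)

theorem pvChunk3_take_drop (l : List Char) (h : l ≠ []) :
    pvChunk3 l = String.ofList (l.take 3) :: pvChunk3 (l.drop 3) := by
  match l with
  | [a] => simp [pvChunk3]
  | [a, b] => simp [pvChunk3]
  | a :: b :: c :: rest => simp [pvChunk3]

-- A's lazy flush-at-4th-digit chunker
def pvLazy : List Char → List Char → List String × List Char
  | tmp, [] => ([], tmp)
  | tmp, d :: ds =>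
    if tmp.length < 3 then pvLazy (tmp ++ [d]) ds
    else
      let r := pvLazy [d] ds
      (String.ofList tmp :: r.1, r.2)

def pvFlush (tmp ds : List Char) : List String :=
  (pvLazy tmp ds).1 ++ [String.ofList (pvLazy tmp ds).2]

theorem pvFlush_eq : ∀ (ds tmp : List Char), tmp.length ≤ 3 → pvFlush tmp ds = pvChunk3' (tmp ++ ds) := by
  intro ds
  induction ds with
  | nil =>
    intro tmp h
    simp only [pvFlush, pvLazy, pvChunk3', List.append_nil]
    by_cases ht : tmp = []
    · subst ht; simp
    · rw [if_neg ht, pvChunk3_take_drop _ ht]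
      rw [List.take_of_length_le h, List.drop_of_length_le h]
      simp [pvChunk3]
  | cons d ds ih =>
    intro tmp h
    by_cases hlt : tmp.length < 3
    · have he : pvFlush tmp (d :: ds) = pvFlush (tmp ++ [d]) ds := by
        simp only [pvFlush, pvLazy, if_pos hlt]
      rw [he, ih _ (by simp; omega)]
      simp [pvChunk3']
    · have h3 : tmp.length = 3 := by omega
      have he : pvFlush tmp (d :: ds) = String.ofList tmp :: pvFlush [d] ds := by
        simp only [pvFlush, pvLazy, if_neg hlt, List.cons_append]
      rw [he, ih [d] (by simp)]
      simp only [List.singleton_append]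
      have hne : tmp ++ d :: ds ≠ [] := by simp
      simp only [pvChunk3', if_neg hne, if_neg (List.cons_ne_nil d ds)]
      rw [pvChunk3_take_drop _ hne]
      congr 2
      · rw [← h3, List.take_left]
      · rw [← h3, List.drop_left]

/- ----- the dictionary's shape during A's loop ----- -/

def pvEntries : Nat → List (List String) → List (String × List String)
  | _, [] => []
  | n, v :: vs => (pvKey n, v) :: pvEntries (n + 1) vs

def pvCur (n : Nat) (cur : List String) : List (String × List String) :=
  if cur = [] then [] else [(pvKey n, cur)]

theorem pvEntries_append : ∀ (vs ws : List (List String)) (n : Nat),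
    pvEntries n (vs ++ ws) = pvEntries n vs ++ pvEntries (n + vs.length) ws := by
  intro vs
  induction vs with
  | nil => intro ws n; simp [pvEntries]
  | cons v vs ih =>
    intro ws n
    simp only [List.cons_append, pvEntries, ih, List.length_cons]
    rw [show n + (vs.length + 1) = n + 1 + vs.length by omega]

theorem pvKey_not_mem_entries : ∀ (vs : List (List String)) (n m : Nat), n + vs.length ≤ m →
    pvKey m ∉ (pvEntries n vs).map Prod.fst := by
  intro vs
  induction vs with
  | nil => intro n m _; simp [pvEntries]
  | cons v vs ih =>
    intro n m hm
    simp only [pvEntries, List.map_cons, List.mem_cons]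
    rintro (h | h)
    · have := pvKey_inj h.symm
      simp at hm; omega
    · exact ih (n + 1) m (by simp at hm ⊢; omega) h

theorem pvContains_mk_false (l : List (String × List String)) (k : String)
    (h : k ∉ l.map Prod.fst) : (PySem.Dict.mk l).contains k = false := by
  rw [PySem.Dict.contains_mk, List.any_eq_false]
  intro p hp
  simp only [beq_iff_eq]
  intro hpk
  exact h (hpk ▸ List.mem_map_of_mem hp)

theorem pvContains_mk_true (l : List (String × List String)) (k : String)
    (h : k ∈ l.map Prod.fst) : (PySem.Dict.mk l).contains k = true := by
  rw [PySem.Dict.contains_mk, List.any_eq_true]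
  rcases List.mem_map.mp h with ⟨p, hp, hpk⟩
  exact ⟨p, hp, by simp [hpk]⟩

theorem pvGet?_mk_append_self (l : List (String × List String)) (k : String) (v : List String)
    (h : k ∉ l.map Prod.fst) : (PySem.Dict.mk (l ++ [(k, v)])).get? k = some v := by
  induction l with
  | nil => simp [PySem.Dict.get?_mk_cons]
  | cons p l ih =>
    simp only [List.map_cons, List.mem_cons] at h
    push_neg at h
    rw [List.cons_append, PySem.Dict.get?_mk_cons, if_neg (by simp; exact fun he => h.1 he.symm), ih h.2]

theorem pvMap_update_last (l : List (String × List String)) (k : String) (v w : List String)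
    (h : k ∉ l.map Prod.fst) :
    (l ++ [(k, v)]).map (fun p => if p.1 == k then (k, w) else p) = l ++ [(k, w)] := by
  induction l with
  | nil => simp
  | cons p l ih =>
    simp only [List.map_cons, List.mem_cons] at h
    push_neg at h
    rw [List.cons_append, List.map_cons, if_neg (by simp; exact fun he => h.1 he.symm), ih h.2, List.cons_append]

theorem pvDict_eq {κ ν : Type} (d e : PySem.Dict κ ν) (h : d.items = e.items) : d = e := by
  cases d; cases e; simpa using h

theorem pvStore (done : List (List String)) (cur : List String) (tmp : List Char) :
    storeDetails (PySem.Dict.mk (pvEntries 0 done ++ pvCur done.length cur)) (done.length : Int) tmp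
      = PySem.Dict.mk (pvEntries 0 done ++ [(pvKey done.length, cur ++ [String.ofList tmp])]) := by
  have hnot : pvKey done.length ∉ (pvEntries 0 done).map Prod.fst :=
    pvKey_not_mem_entries done 0 done.length (by omega)
  have hkey : ("part" ++ PySem.Int.toStr (done.length : Int)) = pvKey done.length := rfl
  unfold storeDetails
  rw [PySem.Chars.join_nil_singletons, hkey]
  have hsd : (PySem.Dict.mk (pvEntries 0 done ++ pvCur done.length cur)).setdefault
      (pvKey done.length) []
      = PySem.Dict.mk (pvEntries 0 done ++ [(pvKey done.length, cur)]) := by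
    by_cases hc : cur = []
    · subst hc
      rw [show pvCur done.length ([] : List String) = [] by simp [pvCur], List.append_nil]
      rw [PySem.Dict.setdefault_of_not_contains _ _ (pvContains_mk_false _ _ hnot)]
      exact pvDict_eq _ _ (PySem.Dict.items_insert_of_not_contains _ _ (pvContains_mk_false _ _ hnot))
    · rw [show pvCur done.length cur = [(pvKey done.length, cur)] by simp [pvCur, hc]]
      rw [PySem.Dict.setdefault_of_contains _ _ (pvContains_mk_true _ _ (by simp))]
  dsimp only
  rw [hsd]
  unfold PySem.Dict.modify
  rw [PySem.Dict.getD_eq_get?_getD, pvGet?_mk_append_self _ _ _ hnot]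
  apply pvDict_eq
  rw [PySem.Dict.items_insert_of_contains _ _ (pvContains_mk_true _ _ (by simp))]
  exact pvMap_update_last _ _ _ _ hnot

/- ----- part values produced by one segment ----- -/

def pvPartVals (cs tmp : List Char) (cur : List String) : List (List String) :=
  match pvSplit cs with
  | [] => []      -- unreachable
  | s0 :: rest => (cur ++ pvFlush tmp (pvDigits s0)) :: rest.map (fun s => pvChunk3' (pvDigits s))

theorem pvDigit_ne_dot {c : Char} (h : PySem.Chars.isdigit c = true) : c ≠ '.' := by
  intro he; subst he; simp [PySem.Chars.isdigit] at h

theorem pvFlush_cons_lt {tmp : List Char} (d : Char) (ds : List Char) (hlt : tmp.length < 3) :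
    pvFlush tmp (d :: ds) = pvFlush (tmp ++ [d]) ds := by
  simp only [pvFlush, pvLazy, if_pos hlt]

theorem pvFlush_cons_full {tmp : List Char} (d : Char) (ds : List Char) (hlt : ¬ tmp.length < 3) :
    pvFlush tmp (d :: ds) = String.ofList tmp :: pvFlush [d] ds := by
  simp only [pvFlush, pvLazy, if_neg hlt, List.cons_append]

theorem pvFlush_nil (tmp : List Char) : pvFlush tmp [] = [String.ofList tmp] := by
  simp [pvFlush, pvLazy]

theorem pvPartVals_nil_nil (cs : List Char) :
    pvPartVals cs [] [] = (pvSplit cs).map (fun s => pvChunk3' (pvDigits s)) := by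
  unfold pvPartVals
  cases hs : pvSplit cs with
  | nil => exact absurd hs (pvSplit_ne_nil cs)
  | cons s0 rest =>
    simp only [List.map_cons, List.nil_append]
    congr 1
    rw [pvFlush_eq _ [] (by simp)]
    simp

theorem pvPartVals_cons_digit_lt {c : Char} {tmp : List Char} (cs : List Char) (cur : List String)
    (hd : PySem.Chars.isdigit c = true) (hlt : tmp.length < 3) :
    pvPartVals (c :: cs) tmp cur = pvPartVals cs (tmp ++ [c]) cur := by
  unfold pvPartVals
  simp only [pvSplit, if_neg (pvDigit_ne_dot hd)]
  cases hs : pvSplit cs with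
  | nil => exact absurd hs (pvSplit_ne_nil cs)
  | cons s0 rest =>
    simp only
    congr 2
    simp only [pvDigits, List.filter_cons, hd, if_pos]
    exact pvFlush_cons_lt c _ hlt

theorem pvPartVals_cons_digit_full {c : Char} {tmp : List Char} (cs : List Char) (cur : List String)
    (hd : PySem.Chars.isdigit c = true) (hlt : ¬ tmp.length < 3) :
    pvPartVals (c :: cs) tmp cur = pvPartVals cs [c] (cur ++ [String.ofList tmp]) := by
  unfold pvPartVals
  simp only [pvSplit, if_neg (pvDigit_ne_dot hd)]
  cases hs : pvSplit cs with
  | nil => exact absurd hs (pvSplit_ne_nil cs)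
  | cons s0 rest =>
    simp only
    congr 1
    simp only [pvDigits, List.filter_cons, hd, if_pos]
    rw [pvFlush_cons_full c _ hlt]
    simp

theorem pvPartVals_cons_other {c : Char} {tmp : List Char} (cs : List Char) (cur : List String)
    (hd : PySem.Chars.isdigit c = false) (hdot : c ≠ '.') :
    pvPartVals (c :: cs) tmp cur = pvPartVals cs tmp cur := by
  unfold pvPartVals
  simp only [pvSplit, if_neg hdot]
  cases hs : pvSplit cs with
  | nil => exact absurd hs (pvSplit_ne_nil cs)
  | cons s0 rest =>
    simp only
    congr 3
    simp [pvDigits, hd]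

theorem pvPartVals_cons_dot (cs tmp : List Char) (cur : List String) :
    pvPartVals ('.' :: cs) tmp cur
      = (cur ++ [String.ofList tmp]) :: (pvSplit cs).map (fun s => pvChunk3' (pvDigits s)) := by
  have hs : pvSplit ('.' :: cs) = [] :: pvSplit cs := by simp [pvSplit]
  unfold pvPartVals
  rw [hs]
  dsimp only
  rw [show pvDigits ([] : List Char) = [] from rfl, pvFlush_nil]

/- ----- A's loop ----- -/

theorem pvLoop : ∀ (cs : List Char) (done : List (List String)) (cur : List String) (tmp : List Char),
    tmp.length ≤ 3 →
    (let st := cs.foldl ipStep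
        (tmp, (PySem.Dict.mk (pvEntries 0 done ++ pvCur done.length cur)), (done.length : Int));
     (storeDetails st.2.1 st.2.2 st.1).items)
      = pvEntries 0 (done ++ pvPartVals cs tmp cur) := by
  intro cs
  induction cs with
  | nil =>
    intro done cur tmp h
    simp only [List.foldl_nil]
    rw [pvStore done cur tmp]
    unfold pvPartVals
    simp only [pvSplit, List.map_nil]
    rw [show pvDigits ([] : List Char) = [] from rfl, pvFlush_nil, pvEntries_append]
    simp [pvEntries]
  | cons c cs ih =>
    intro done cur tmp h
    simp only [List.foldl_cons]
    by_cases hd : PySem.Chars.isdigit c = true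
    · by_cases hlt : tmp.length < 3
      · have hstep : ipStep (tmp, (PySem.Dict.mk (pvEntries 0 done ++ pvCur done.length cur)), (done.length : Int)) c
            = (tmp ++ [c], (PySem.Dict.mk (pvEntries 0 done ++ pvCur done.length cur)), (done.length : Int)) := by
          simp [ipStep, hd, hlt]
        rw [hstep, ih done cur (tmp ++ [c]) (by simp; omega), pvPartVals_cons_digit_lt cs cur hd hlt]
      · have hstep : ipStep (tmp, (PySem.Dict.mk (pvEntries 0 done ++ pvCur done.length cur)), (done.length : Int)) c
            = ([c], storeDetails (PySem.Dict.mk (pvEntries 0 done ++ pvCur done.length cur)) (done.length : Int) tmp, (done.length : Int)) := by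
          simp [ipStep, hd, hlt]
        rw [hstep, pvStore done cur tmp]
        have hcur : (pvEntries 0 done ++ [(pvKey done.length, cur ++ [String.ofList tmp])])
            = pvEntries 0 done ++ pvCur done.length (cur ++ [String.ofList tmp]) := by
          simp [pvCur]
        rw [hcur, ih done (cur ++ [String.ofList tmp]) [c] (by simp),
          pvPartVals_cons_digit_full cs cur hd hlt]
    · by_cases hdot : c = '.'
      · subst hdot
        have hstep : ipStep (tmp, (PySem.Dict.mk (pvEntries 0 done ++ pvCur done.length cur)), (done.length : Int)) '.'
            = ([], storeDetails (PySem.Dict.mk (pvEntries 0 done ++ pvCur done.length cur)) (done.length : Int) tmp, (done.length : Int) + 1) := by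
          simp [ipStep, hd]
        rw [hstep, pvStore done cur tmp]
        have hdict : (pvEntries 0 done ++ [(pvKey done.length, cur ++ [String.ofList tmp])])
            = pvEntries 0 (done ++ [cur ++ [String.ofList tmp]])
              ++ pvCur (done ++ [cur ++ [String.ofList tmp]]).length [] := by
          rw [pvEntries_append]
          simp [pvEntries, pvCur]
        have hcnt : ((done.length : Int) + 1) = (((done ++ [cur ++ [String.ofList tmp]]).length : Nat) : Int) := by
          simp
        rw [hdict, hcnt, ih (done ++ [cur ++ [String.ofList tmp]]) [] [] (by simp),
          pvPartVals_cons_dot cs tmp cur, ← pvPartVals_nil_nil]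
        simp
      · have hstep : ipStep (tmp, (PySem.Dict.mk (pvEntries 0 done ++ pvCur done.length cur)), (done.length : Int)) c
            = (tmp, (PySem.Dict.mk (pvEntries 0 done ++ pvCur done.length cur)), (done.length : Int)) := by
          simp [ipStep, hd, hdot]
        rw [hstep, ih done cur tmp h, pvPartVals_cons_other cs cur (by simpa using hd) hdot]

/- ----- B's fold over the enumerated parts ----- -/

def pvKf (ip : Int × List Char) : String := "part" ++ PySem.Int.toStr ip.1

def pvVf (ip : Int × List Char) : List String :=
  let digits := PySem.Chars.join [] ((ip.2.filter (fun c => PySem.Chars.isdigit c)).map (fun c => [c]))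
  let chunks := (PySem.List.pyRange 0 (PySem.Chars.len digits) 3).map
    (fun j => String.ofList (PySem.List.slice digits (some j) (some (j + 3))))
  if chunks = [] then [""] else chunks

theorem pvChunk3_ne_nil (l : List Char) (h : l ≠ []) : pvChunk3 l ≠ [] := by
  match l with
  | [] => exact absurd rfl h
  | [a] => simp [pvChunk3]
  | [a, b] => simp [pvChunk3]
  | a :: b :: c :: r => simp [pvChunk3]

theorem pvVf_eq (ip : Int × List Char) : pvVf ip = pvChunk3' (pvDigits ip.2) := by
  unfold pvVf
  rw [PySem.Chars.join_nil_singletons]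
  dsimp only
  rw [pvChunksB_eq]
  by_cases hd : ip.2.filter (fun c => PySem.Chars.isdigit c) = []
  · rw [if_pos (by rw [hd]; rfl)]
    simp [pvChunk3', pvDigits, hd]
  · rw [if_neg (pvChunk3_ne_nil _ hd)]
    simp [pvChunk3', pvDigits, hd]

theorem pvEnumMap : ∀ (parts : List (List Char)) (n : Nat),
    (PySem.List.enumerate parts (n : Int)).map (fun ip => (pvKf ip, pvChunk3' (pvDigits ip.2)))
      = pvEntries n (parts.map (fun s => pvChunk3' (pvDigits s))) := by
  intro parts
  induction parts with
  | nil => intro n; simp [PySem.List.enumerate_nil, pvEntries]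
  | cons p ps ih =>
    intro n
    rw [PySem.List.enumerate_cons]
    simp only [List.map_cons, pvEntries]
    congr 1
    rw [show ((n : Int) + 1) = (((n + 1 : Nat)) : Int) by push_cast; ring]
    exact ih (n + 1)

theorem pvAlt_eq (a : String) :
    ip_finder_alt a = pvEntries 0 ((pvSplit a.toList).map (fun s => pvChunk3' (pvDigits s))) := by
  unfold ip_finder_alt
  rw [show ".".toList = ['.'] from rfl, pvSplitOn_eq]
  dsimp only
  have hfun : (fun (opt : PySem.Dict String (List String)) (ip : Int × List Char) =>
      let digits := PySem.Chars.join [] ((ip.2.filter (fun c => PySem.Chars.isdigit c)).map (fun c => [c]))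
      let chunks := (PySem.List.pyRange 0 (PySem.Chars.len digits) 3).map
        (fun j => String.ofList (PySem.List.slice digits (some j) (some (j + 3))))
      opt.insert ("part" ++ PySem.Int.toStr ip.1) (if chunks = [] then [""] else chunks))
      = fun opt ip => opt.insert (pvKf ip) (pvVf ip) := rfl
  rw [hfun]
  rw [PySem.Dict.items_foldl_insert_fresh (PySem.List.enumerate (pvSplit a.toList)) pvKf pvVf
    PySem.Dict.empty (by intro x _; simp [PySem.Dict.contains_empty])
    (by
      have hmap : (PySem.List.enumerate (pvSplit a.toList)).map pvKf
          = (PySem.List.pyRange 0 (0 + (pvSplit a.toList).length) 1).map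
              (fun i => "part" ++ PySem.Int.toStr i) := by
        rw [← PySem.List.map_fst_enumerate (pvSplit a.toList) 0, List.map_map]
        rfl
      rw [hmap]
      apply List.Nodup.map_on
      · intro x hx y hy hxy
        have hx0 : 0 ≤ x := ((PySem.List.mem_pyRange_one).mp hx).1
        have hy0 : 0 ≤ y := ((PySem.List.mem_pyRange_one).mp hy).1
        exact pvKeyInt_inj hx0 hy0 hxy
      · exact PySem.List.nodup_pyRange_one _ _)]
  rw [List.map_congr_left (fun ip _ => by rw [pvVf_eq ip] : ∀ ip ∈ PySem.List.enumerate (pvSplit a.toList), (pvKf ip, pvVf ip) = (pvKf ip, pvChunk3' (pvDigits ip.2)))]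
  rw [show ((0 : Int) = ((0 : Nat) : Int)) from rfl] -- align cast for pvEnumMap
  rw [pvEnumMap (pvSplit a.toList) 0]
  simp [PySem.Dict.empty]

-- ===== VERDICT (by name: the statement is the Claim_ definition above) =====
theorem ip_finder_spec : Claim_equal_ip_finder := by
  unfold Claim_equal_ip_finder Spec_ip_finder
  intro a _
  have hA : ip_finder a = pvEntries 0 (pvPartVals a.toList [] []) := by
    unfold ip_finder
    have h := pvLoop a.toList [] [] [] (by simp)
    simpa using h
  rw [hA, pvAlt_eq, pvPartVals_nil_nil]
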